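-- pv_equiv track=rewrite | github.com/tocsnostrap/nextgen-ai-tutor | backend/conversational_ai.py | _adapt_language
-- ===== SOURCE A (Python) =====
-- def _adapt_language(text: str, age_group: str) -> str:
--     if age_group == "3-5":
--         replacements = {
--             "fundamental": "basic",
--             "systematically": "step by step",
--             "perspective": "way of looking at it",
--             "component": "part",
--             "concept": "idea",
--             "principle": "rule",
--             "calculate": "figure out",
--             "efficient": "fast",
--             "approximately": "about",
--         }
--         for old, new in replacements.items():
--             text = text.replace(old, new)
--     return text
-- ===== SOURCE B (Python) =====
-- import re
--
-- _REPLACEMENTS = {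
--     "fundamental": "basic",
--     "systematically": "step by step",
--     "perspective": "way of looking at it",
--     "component": "part",
--     "concept": "idea",
--     "principle": "rule",
--     "calculate": "figure out",
--     "efficient": "fast",
--     "approximately": "about",
-- }
-- _PATTERN = re.compile("|".join(re.escape(k) for k in _REPLACEMENTS))
--
--
-- def _adapt_language(text: str, age_group: str) -> str:
--     if age_group == "3-5":
--         return _PATTERN.sub(lambda m: _REPLACEMENTS[m.group(0)], text)
--     return text
-- ===== Notes on version B (the rewrite author's own statement) =====
-- stated objective: alternative
-- what changed: Nine sequential full-text .replace passes are replaced by a single left-to-right table-driven scan (one compiled alternation regex with a dict-lookup callback in Python), so replacement output is never rescanned.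
-- intended difference: On texts where a replaced key is immediately followed by the tail of another key (e.g. 'fundamentalomponent': the inserted 'basic' ends in 'c' which completes 'component'), A cascades and rewrites part of its own replacement output, returning 'basipart', while B scans the original text once and returns 'basicomponent'; not re-replacing already-substituted output is the intended behaviour of a vocabulary-substitution pass. — e.g. on _adapt_language("fundamentalomponent", "3-5"): A returns "basipart", B returns "basicomponent"
import Mathlib
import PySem

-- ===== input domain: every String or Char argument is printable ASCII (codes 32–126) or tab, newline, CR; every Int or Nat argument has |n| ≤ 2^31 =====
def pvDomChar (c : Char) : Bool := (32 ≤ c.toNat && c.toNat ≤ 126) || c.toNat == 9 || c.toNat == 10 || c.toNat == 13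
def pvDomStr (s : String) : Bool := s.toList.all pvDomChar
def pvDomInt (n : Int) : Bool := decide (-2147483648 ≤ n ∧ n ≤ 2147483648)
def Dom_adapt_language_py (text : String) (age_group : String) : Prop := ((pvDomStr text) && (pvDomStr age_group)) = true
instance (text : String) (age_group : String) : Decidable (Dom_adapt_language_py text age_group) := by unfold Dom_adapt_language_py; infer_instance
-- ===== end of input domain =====

-- B replaces A's nine sequential full-text replace passes by a single left-to-right
-- table-driven scan (in Python: one alternation regex with a dict-lookup callback), so
-- replacement output is never rescanned; on the straddle inputs of D_ below the two differ.

-- ===== PORT A =====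
def adapt_language_py (text : String) (age_group : String) : String :=
  if age_group == "3-5" then
    let replacements : PySem.Dict String String :=
      PySem.Dict.ofList [("fundamental", "basic"), ("systematically", "step by step"),
        ("perspective", "way of looking at it"), ("component", "part"), ("concept", "idea"),
        ("principle", "rule"), ("calculate", "figure out"), ("efficient", "fast"),
        ("approximately", "about")]
    replacements.items.foldl (fun t p => PySem.Str.replace t p.1 p.2) text
  else
    text

-- ===== PORT B =====
-- the compiled replacement table (= _REPLACEMENTS / _PATTERN of Source B), over char lists
def pvPairs : List (List Char × List Char) :=
  [("fundamental".toList, "basic".toList), ("systematically".toList, "step by step".toList),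
   ("perspective".toList, "way of looking at it".toList), ("component".toList, "part".toList),
   ("concept".toList, "idea".toList), ("principle".toList, "rule".toList),
   ("calculate".toList, "figure out".toList), ("efficient".toList, "fast".toList),
   ("approximately".toList, "about".toList)]

-- the re.sub scan: at each position try the alternatives in order; on a match emit the
-- dict value and continue after the match, else emit the char (fuel = remaining length)
def pvScan : Nat → List Char → List Char
  | 0, l => l
  | _ + 1, [] => []
  | f + 1, c :: t =>
    match pvPairs.find? (fun p => p.1.isPrefixOf (c :: t)) with
    | some p => p.2 ++ pvScan f (List.drop p.1.length (c :: t))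
    | none => c :: pvScan f t

def adapt_language_py_alt (text : String) (age_group : String) : String :=
  if age_group == "3-5" then String.ofList (pvScan text.toList.length text.toList)
  else text

-- ===== PRECONDITION & SPEC =====
-- On texts where an occurrence of a key is immediately followed by the tail of another key
-- (exactly: one of the trigger strings below occurs in text), A cascades — its inserted
-- replacement joins with the following original text into a new key that a later pass
-- rewrites (e.g. on 'fundamentalomponent' A returns 'basipart') — while B scans the original
-- text once and returns 'basicomponent'; not re-replacing already-substituted output is the
-- intended behaviour of a vocabulary-substitution pass.
def D_adapt_language_py (text : String) (age_group : String) : Prop :=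
  age_group = "3-5" ∧
    (PySem.Str.isIn "systematicallyerspective" text = true ∨
     PySem.Str.isIn "fundamentalomponent" text = true ∨
     PySem.Str.isIn "fundamentaloncept" text = true ∨
     PySem.Str.isIn "systematicallyrinciple" text = true ∨
     PySem.Str.isIn "fundamentalalculate" text = true ∨
     PySem.Str.isIn "principlefficient" text = true ∨
     PySem.Str.isIn "conceptpproximately" text = true)
instance (text : String) (age_group : String) : Decidable (D_adapt_language_py text age_group) := by
  unfold D_adapt_language_py; infer_instance

def Spec_adapt_language_py (text : String) (age_group : String) (out : String) : Prop :=
  ¬ D_adapt_language_py text age_group → out = adapt_language_py_alt text age_group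
instance (text : String) (age_group : String) (out : String) : Decidable (Spec_adapt_language_py text age_group out) := by
  unfold Spec_adapt_language_py; infer_instance

def pvDiffWitness_adapt_language_py : String × String := ("fundamentalomponent", "3-5")
def pvDiffWitnessOut_adapt_language_py : String × String := ("basipart", "basicomponent")

-- ===== CLAIM (what is proved, stated in full; the proofs are below) =====
def Claim_unchanged_adapt_language_py : Prop := ∀ (text : String) (age_group : String), Dom_adapt_language_py text age_group → Spec_adapt_language_py text age_group (adapt_language_py text age_group)
def Claim_exact_adapt_language_py : Prop := ∀ (text : String) (age_group : String), Dom_adapt_language_py text age_group → D_adapt_language_py text age_group → adapt_language_py text age_group ≠ adapt_language_py_alt text age_group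
def Claim_changed_adapt_language_py : Prop := Dom_adapt_language_py (pvDiffWitness_adapt_language_py.1) (pvDiffWitness_adapt_language_py.2) ∧ D_adapt_language_py (pvDiffWitness_adapt_language_py.1) (pvDiffWitness_adapt_language_py.2) ∧ adapt_language_py (pvDiffWitness_adapt_language_py.1) (pvDiffWitness_adapt_language_py.2) = pvDiffWitnessOut_adapt_language_py.1 ∧ adapt_language_py_alt (pvDiffWitness_adapt_language_py.1) (pvDiffWitness_adapt_language_py.2) = pvDiffWitnessOut_adapt_language_py.2 ∧ pvDiffWitnessOut_adapt_language_py.1 ≠ pvDiffWitnessOut_adapt_language_py.2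

-- ===== LEMMAS AND PROOFS =====

-- the trigger strings of D_, as a list (proof-side only)
def pvTriggers : List String :=
  ["systematicallyerspective", "fundamentalomponent", "fundamentaloncept",
   "systematicallyrinciple", "fundamentalalculate", "principlefficient",
   "conceptpproximately"]

-- single-key scan: pvRep1 (k, r) fuel l is Python's l.replace(k, r) (fuel = length)
def pvRep1 (p : List Char × List Char) : Nat → List Char → List Char
  | 0, l => l
  | _ + 1, [] => []
  | f + 1, c :: t =>
    if p.1.isPrefixOf (c :: t) then p.2 ++ pvRep1 p f (List.drop p.1.length (c :: t))
    else c :: pvRep1 p f t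

-- ===== cascade-aware rendering (proof machinery for A's chain) =====

-- the straddle edge: the last char of an inserted value joins the following text
-- into a new key occurrence (the cascade of A)
def pvEdge (r l : List Char) : Option (List Char × List Char) :=
  pvPairs.find? (fun p => (r.getLast? == p.1.head?) && (p.1.drop 1).isPrefixOf l)

-- partial rendering of A's chain after the passes in `done` (an order-prefix of pvPairs),
-- with cascades unrolled (chains have depth at most 2 for this table)
def pvG (done : List (List Char × List Char)) : Nat → List Char → List Char
  | 0, l => l
  | _ + 1, [] => []
  | f + 1, c :: t =>
    match pvPairs.find? (fun p => p.1.isPrefixOf (c :: t)) with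
    | none => c :: pvG done f t
    | some q =>
      if q ∈ done then
        match pvEdge q.2 (List.drop q.1.length (c :: t)) with
        | none => q.2 ++ pvG done f (List.drop q.1.length (c :: t))
        | some p1 =>
          if p1 ∈ done then
            match pvEdge p1.2 (List.drop (p1.1.length - 1) (List.drop q.1.length (c :: t))) with
            | none => q.2.dropLast ++ p1.2 ++ pvG done f (List.drop (p1.1.length - 1) (List.drop q.1.length (c :: t)))
            | some p2 =>
              if p2 ∈ done then
                q.2.dropLast ++ p1.2.dropLast ++ p2.2 ++ pvG done f (List.drop (p2.1.length - 1) (List.drop (p1.1.length - 1) (List.drop q.1.length (c :: t))))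
              else q.2.dropLast ++ p1.2 ++ pvG done f (List.drop (p1.1.length - 1) (List.drop q.1.length (c :: t)))
          else q.2 ++ pvG done f (List.drop q.1.length (c :: t))
      else q.1 ++ pvG done f (List.drop q.1.length (c :: t))

-- finite facts about the table (all by decide)
lemma pv_keys_ne_nil : ∀ p ∈ pvPairs, p.1 ≠ [] := by decide
lemma pv_chkA : ∀ K ∈ pvPairs, ∀ q ∈ pvPairs, ∀ v ∈ K.1.tails,
    ¬ (q.1 <+: v ∧ q.1.length < v.length) := by decide
lemma pv_chkB : ∀ K ∈ pvPairs, ∀ q ∈ pvPairs, ∀ v ∈ K.1.tails, v ≠ [] →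
    ¬ v <+: q.2 ∧ ¬ (q.2 <+: v ∧ q.2.length < v.length) := by decide
lemma pv_keys_len2 : ∀ p ∈ pvPairs, 2 ≤ p.1.length := by decide
lemma pv_vals_ne_nil : ∀ p ∈ pvPairs, p.2 ≠ [] := by decide
lemma pv_drop1_incomp : ∀ p ∈ pvPairs, ∀ q ∈ pvPairs, p ≠ q → ¬ (p.1.drop 1 <+: q.1.drop 1) := by decide
lemma pv_key_not_in_val : ∀ p ∈ pvPairs, ∀ q ∈ pvPairs, ¬ p.1 <:+: q.2 := by decide
lemma pv_val_not_in_key : ∀ p ∈ pvPairs, ∀ q ∈ pvPairs, ¬ q.2 <:+: p.1 := by decide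
lemma pv_drop1_not_pre_val : ∀ p ∈ pvPairs, ∀ q ∈ pvPairs, ¬ p.1.drop 1 <+: q.2 := by decide
lemma pv_chkV2 : ∀ q ∈ pvPairs, ∀ v ∈ q.2.tails, 2 ≤ v.length →
    ∀ p ∈ pvPairs, ¬ (v <+: p.1 ∧ v.length < p.1.length) := by decide
lemma pv_chkV2' : ∀ q ∈ pvPairs, ∀ v ∈ q.2.dropLast.tails, 2 ≤ v.length →
    ∀ p ∈ pvPairs, ¬ (v <+: p.1 ∧ v.length < p.1.length) := by decide
lemma pv_chkPen2 : ∀ q ∈ pvPairs, ∀ k ∈ pvPairs, ¬ (k.1.take 2 <:+ q.2) := by decide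
lemma pv_chkBD : ∀ K ∈ pvPairs, ∀ q ∈ pvPairs, ∀ v ∈ K.1.tails,
    ¬ (q.2.dropLast <+: v ∧ q.2.dropLast.length < v.length) := by decide
lemma pv_chk2hop : ∀ q ∈ pvPairs, ∀ p1 ∈ pvPairs, ∀ p2 ∈ pvPairs, ∀ p ∈ pvPairs,
    (q.2.getLast? == p1.1.head?) = true → (p1.2.getLast? == p2.1.head?) = true →
    (p2.2.getLast? == p.1.head?) = false := by decide
lemma pv_trig_in_key : ∀ q ∈ pvPairs, ∀ v ∈ q.1.tails, v ≠ [] → v ≠ q.1 →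
    ∀ tr ∈ pvTriggers, ¬ v <+: tr.toList := by decide
lemma pv_edge_trig : ∀ q ∈ pvPairs, ∀ p ∈ pvPairs, (q.2.getLast? == p.1.head?) = true →
    (q.1 ++ p.1.drop 1) ∈ pvTriggers.map (fun tr => tr.toList) := by decide
lemma pv_trig_shape : ∀ tr ∈ pvTriggers, ∃ q ∈ pvPairs, ∃ p ∈ pvPairs,
    tr.toList = q.1 ++ p.1.drop 1 ∧ (q.2.getLast? == p.1.head?) = true := by decide

lemma pvRep1_nil (p : List Char × List Char) (f : Nat) : pvRep1 p f [] = [] := by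
  cases f <;> rfl

lemma pv_go_eq (k r : List Char) : ∀ (f : Nat) (l acc : List Char),
    PySem.Chars.replace.go k r f l acc = acc.reverse ++ pvRep1 (k, r) f l := by
  intro f
  induction f with
  | zero => intro l acc; simp [PySem.Chars.replace.go, pvRep1]
  | succ f ih =>
    intro l acc
    cases l with
    | nil => simp [PySem.Chars.replace.go, pvRep1]
    | cons c t =>
      rw [PySem.Chars.replace.go]
      by_cases h : k.isPrefixOf (c :: t)
      · simp only [pvRep1, h, if_true, ih]
        simp
      · simp only [pvRep1, h, if_false, Bool.false_eq_true, ih]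
        simp

lemma pv_replace_eq (l k r : List Char) (hk : k ≠ []) :
    PySem.Chars.replace l k r = pvRep1 (k, r) l.length l := by
  have hke : k.isEmpty = false := by simpa [List.isEmpty_iff] using hk
  rw [PySem.Chars.replace, hke]
  simpa using pv_go_eq k r l.length l []

lemma pvRep1_fuel (p : List Char × List Char) (hk : p.1 ≠ []) :
    ∀ (f g : Nat) (l : List Char), l.length ≤ f → l.length ≤ g →
    pvRep1 p f l = pvRep1 p g l := by
  have hk1 : 1 ≤ p.1.length := List.length_pos_iff.mpr hk
  intro f
  induction f with
  | zero =>
    intro g l h1 _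
    have : l = [] := List.eq_nil_of_length_eq_zero (Nat.le_zero.mp h1)
    subst this; rw [pvRep1_nil, pvRep1_nil]
  | succ f ih =>
    intro g l h1 h2
    cases g with
    | zero =>
      have : l = [] := List.eq_nil_of_length_eq_zero (Nat.le_zero.mp h2)
      subst this; rw [pvRep1_nil, pvRep1_nil]
    | succ g =>
      cases l with
      | nil => rw [pvRep1_nil, pvRep1_nil]
      | cons c t =>
        simp only [List.length_cons] at h1 h2
        by_cases h : p.1.isPrefixOf (c :: t)
        · simp only [pvRep1, h, if_true]
          congr 1
          exact ih g _ (by simp [List.length_drop]; omega) (by simp [List.length_drop]; omega)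
        · simp only [pvRep1, h, if_false, Bool.false_eq_true]
          congr 1
          exact ih g t (by omega) (by omega)

lemma pvSkip (p : List Char × List Char) :
    ∀ (b x : List Char) (f : Nat),
    (∀ v, v <:+ b → v ≠ [] → ¬ p.1 <+: (v ++ x)) →
    pvRep1 p (b.length + f) (b ++ x) = b ++ pvRep1 p f x := by
  intro b
  induction b with
  | nil => intro x f _; simp
  | cons c b' ih =>
    intro x f H
    have hnp : ¬ p.1.isPrefixOf (c :: (b' ++ x)) := by
      have := H (c :: b') List.suffix_rfl (by simp)
      simpa [List.isPrefixOf_iff_prefix] using this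
    show pvRep1 p (b'.length + 1 + f) (c :: (b' ++ x)) = c :: (b' ++ pvRep1 p f x)
    have : b'.length + 1 + f = (b'.length + f) + 1 := by omega
    rw [this]
    simp only [pvRep1, hnp, if_false, Bool.false_eq_true]
    rw [ih x f (fun v hv hvne => H v (hv.trans (List.suffix_cons c b')) hvne)]

-- small helpers
lemma pvG_nil (done : List (List Char × List Char)) (f : Nat) : pvG done f [] = [] := by
  cases f <;> rfl

lemma pvG_fuel (done : List (List Char × List Char)) :
    ∀ (f g : Nat) (l : List Char), l.length ≤ f → l.length ≤ g →
    pvG done f l = pvG done g l := by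
  intro f
  induction f with
  | zero =>
    intro g l h1 _
    have : l = [] := List.eq_nil_of_length_eq_zero (Nat.le_zero.mp h1)
    subst this; rw [pvG_nil, pvG_nil]
  | succ f ih =>
    intro g l h1 h2
    cases g with
    | zero =>
      have : l = [] := List.eq_nil_of_length_eq_zero (Nat.le_zero.mp h2)
      subst this; rw [pvG_nil, pvG_nil]
    | succ g =>
      cases l with
      | nil => rw [pvG_nil, pvG_nil]
      | cons c t =>
        simp only [List.length_cons] at h1 h2
        cases hfind : pvPairs.find? (fun p => p.1.isPrefixOf (c :: t)) with
        | none =>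
          simp only [pvG, hfind]
          rw [ih g t (by omega) (by omega)]
        | some q =>
          have hq2 : 2 ≤ q.1.length := pv_keys_len2 q (List.mem_of_find?_eq_some hfind)
          have hr : (List.drop q.1.length (c :: t)).length ≤ t.length - 1 := by
            simp [List.length_drop]; omega
          simp only [pvG, hfind]
          by_cases hqd : q ∈ done
          · simp only [hqd, if_true]
            cases hedge1 : pvEdge q.2 (List.drop q.1.length (c :: t)) with
            | none => rw [ih g _ (by omega) (by omega)]
            | some p1 =>
              have hp12 : 2 ≤ p1.1.length := pv_keys_len2 p1 (List.mem_of_find?_eq_some hedge1)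
              have hr1 : (List.drop (p1.1.length - 1) (List.drop q.1.length (c :: t))).length ≤ t.length - 1 := by
                simp [List.length_drop]; omega
              by_cases hp1d : p1 ∈ done
              · simp only [hp1d, if_true]
                cases hedge2 : pvEdge p1.2 (List.drop (p1.1.length - 1) (List.drop q.1.length (c :: t))) with
                | none => rw [ih g _ (by omega) (by omega)]
                | some p2 =>
                  have hp22 : 2 ≤ p2.1.length := pv_keys_len2 p2 (List.mem_of_find?_eq_some hedge2)
                  by_cases hp2d : p2 ∈ done
                  · simp only [hp2d, if_true]
                    rw [ih g _ (by simp [List.length_drop]; omega) (by simp [List.length_drop]; omega)]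
                  · simp only [hp2d, if_false]
                    rw [ih g _ (by omega) (by omega)]
              · simp only [hp1d, if_false]
                rw [ih g _ (by omega) (by omega)]
          · simp only [hqd, if_false]
            rw [ih g _ (by omega) (by omega)]

lemma pvG_empty_done : ∀ (f : Nat) (l : List Char), l.length ≤ f → pvG [] f l = l := by
  intro f
  induction f with
  | zero =>
    intro l h
    have : l = [] := List.eq_nil_of_length_eq_zero (Nat.le_zero.mp h)
    subst this; rfl
  | succ f ih =>
    intro l h
    cases l with
    | nil => rfl
    | cons c t =>
      simp only [List.length_cons] at h
      cases hfind : pvPairs.find? (fun p => p.1.isPrefixOf (c :: t)) with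
      | none => simp only [pvG, hfind]; rw [ih t (by omega)]
      | some q =>
        have hq : q ∈ pvPairs := List.mem_of_find?_eq_some hfind
        have hq2 : 2 ≤ q.1.length := pv_keys_len2 q hq
        have hqpre : q.1 <+: (c :: t) := by
          have h1 : q.1.isPrefixOf (c :: t) = true := by simpa using List.find?_some hfind
          exact List.isPrefixOf_iff_prefix.mp h1
        obtain ⟨t', ht'⟩ := hqpre
        simp only [pvG, hfind, List.mem_nil_iff, if_false]
        rw [← ht', List.drop_left, ih t' ?_]
        have := congrArg List.length ht'
        simp at this; omega

-- a prefix of a partial rendering that is a suffix of some key is a prefix of the source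
lemma pvPreG (done : List (List Char × List Char)) :
    ∀ (n : Nat) (s v : List Char), s.length ≤ n →
    (∃ K ∈ pvPairs, v <:+ K.1) → v ≠ [] →
    v <+: pvG done s.length s → v <+: s := by
  intro n
  induction n with
  | zero =>
    intro s v hlen _ hne hpre
    have : s = [] := List.eq_nil_of_length_eq_zero (Nat.le_zero.mp hlen)
    subst this
    simp only [List.length_nil, pvG] at hpre
    exact absurd (List.prefix_nil.mp hpre) hne
  | succ n ih =>
    intro s v hlen hK hne hpre
    cases s with
    | nil =>
      simp only [List.length_nil, pvG] at hpre
      exact absurd (List.prefix_nil.mp hpre) hne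
    | cons c t =>
      obtain ⟨K, hKmem, hsuf⟩ := hK
      simp only [List.length_cons] at hlen
      cases hfind : pvPairs.find? (fun p => p.1.isPrefixOf (c :: t)) with
      | none =>
        simp only [List.length_cons, pvG, hfind] at hpre
        cases v with
        | nil => exact absurd rfl hne
        | cons c' w =>
          obtain ⟨hc, hw⟩ := List.cons_prefix_cons.mp hpre
          subst hc
          by_cases hwnil : w = []
          · subst hwnil; exact List.cons_prefix_cons.mpr ⟨rfl, List.nil_prefix⟩
          · have hwsuf : w <:+ K.1 := by
              obtain ⟨u, hu⟩ := hsuf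
              exact ⟨u ++ [c'], by simpa using hu⟩
            have := ih t w (by omega) ⟨K, hKmem, hwsuf⟩ hwnil hw
            exact List.cons_prefix_cons.mpr ⟨rfl, this⟩
      | some q =>
        have hqmem : q ∈ pvPairs := List.mem_of_find?_eq_some hfind
        have hvK : v ∈ K.1.tails := (List.mem_tails _ _).mpr hsuf
        have hqpre : q.1 <+: (c :: t) := by
          have h1 : q.1.isPrefixOf (c :: t) = true := by simpa using List.find?_some hfind
          exact List.isPrefixOf_iff_prefix.mp h1
        simp only [List.length_cons, pvG, hfind] at hpre
        -- every block of the rendering starts with q.1, q.2 or q.2.dropLast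
        have hcase : v <+: q.1 ++ (pvG done t.length (List.drop q.1.length (c :: t)))
            ∨ (∃ Y, v <+: q.2 ++ Y) ∨ (∃ Y, v <+: q.2.dropLast ++ Y) := by
          by_cases hqd : q ∈ done
          · simp only [hqd, if_true] at hpre
            cases hedge1 : pvEdge q.2 (List.drop q.1.length (c :: t)) with
            | none => rw [hedge1] at hpre; exact Or.inr (Or.inl ⟨_, hpre⟩)
            | some p1 =>
              rw [hedge1] at hpre
              by_cases hp1d : p1 ∈ done
              · simp only [hp1d, if_true] at hpre
                cases hedge2 : pvEdge p1.2 (List.drop (p1.1.length - 1) (List.drop q.1.length (c :: t))) with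
                | none =>
                  rw [hedge2] at hpre
                  rw [List.append_assoc] at hpre
                  exact Or.inr (Or.inr ⟨_, hpre⟩)
                | some p2 =>
                  rw [hedge2] at hpre
                  by_cases hp2d : p2 ∈ done
                  · simp only [hp2d, if_true] at hpre
                    simp only [List.append_assoc] at hpre
                    exact Or.inr (Or.inr ⟨_, hpre⟩)
                  · simp only [hp2d, if_false] at hpre
                    rw [List.append_assoc] at hpre
                    exact Or.inr (Or.inr ⟨_, hpre⟩)
              · simp only [hp1d, if_false] at hpre
                exact Or.inr (Or.inl ⟨_, hpre⟩)
          · simp only [hqd, if_false] at hpre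
            exact Or.inl hpre
        rcases hcase with hpre1 | ⟨Y, hpre2⟩ | ⟨Y, hpre3⟩
        · by_cases hlv : v.length ≤ q.1.length
          · have hvq : v <+: q.1 :=
              List.prefix_of_prefix_length_le hpre1 (List.prefix_append q.1 _) hlv
            exact hvq.trans hqpre
          · have : q.1 <+: v :=
              List.prefix_of_prefix_length_le (List.prefix_append q.1 _) hpre1 (by omega)
            exact absurd ⟨this, by omega⟩ (pv_chkA K hKmem q hqmem v hvK)
        · by_cases hlv : v.length ≤ q.2.length
          · exact absurd (List.prefix_of_prefix_length_le hpre2 (List.prefix_append q.2 _) hlv)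
              (pv_chkB K hKmem q hqmem v hvK hne).1
          · have : q.2 <+: v :=
              List.prefix_of_prefix_length_le (List.prefix_append q.2 _) hpre2 (by omega)
            exact absurd ⟨this, by omega⟩ (pv_chkB K hKmem q hqmem v hvK hne).2
        · by_cases hlv : v.length ≤ q.2.dropLast.length
          · have hvd : v <+: q.2.dropLast :=
              List.prefix_of_prefix_length_le hpre3 (List.prefix_append q.2.dropLast _) hlv
            exact absurd (hvd.trans (List.dropLast_prefix q.2))
              (pv_chkB K hKmem q hqmem v hvK hne).1
          · have : q.2.dropLast <+: v :=
              List.prefix_of_prefix_length_le (List.prefix_append q.2.dropLast _) hpre3 (by omega)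
            exact absurd ⟨this, by omega⟩ (pv_chkBD K hKmem q hqmem v hvK)

-- strings none of whose suffixes is prefix-comparable with a key pass through pvG verbatim
def pvStrongT (u : List Char) : Bool :=
  u.tails.all (fun v => v.isEmpty || pvPairs.all (fun k => !(v.isPrefixOf k.1) && !(k.1.isPrefixOf v)))

lemma pvStrongT_spec {u : List Char} (h : pvStrongT u = true) :
    ∀ v, v <:+ u → v ≠ [] → ∀ k ∈ pvPairs, ¬ v <+: k.1 ∧ ¬ k.1 <+: v := by
  intro v hv hvne k hk
  simp only [pvStrongT, List.all_eq_true] at h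
  have := h v ((List.mem_tails _ _).mpr hv)
  rcases Bool.or_eq_true_iff.mp this with h1 | h1
  · exact absurd (List.isEmpty_iff.mp h1) hvne
  · simp only [List.all_eq_true] at h1
    have := h1 k hk
    rcases Bool.and_eq_true_iff.mp this with ⟨ha, hb⟩
    constructor
    · intro hc; simp [List.isPrefixOf_iff_prefix.mpr hc] at ha
    · intro hc; simp [List.isPrefixOf_iff_prefix.mpr hc] at hb

lemma pvStrongT_tail {c : Char} {u : List Char} (h : pvStrongT (c :: u) = true) :
    pvStrongT u = true := by
  simp only [pvStrongT, List.all_eq_true] at h ⊢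
  intro v hv
  exact h v (by rw [List.tails_cons]; exact List.mem_cons_of_mem _ hv)

lemma pvVerbatimStrong (done : List (List Char × List Char)) :
    ∀ (u z : List Char) (f g : Nat), pvStrongT u = true →
    (u ++ z).length ≤ f → z.length ≤ g →
    pvG done f (u ++ z) = u ++ pvG done g z := by
  intro u
  induction u with
  | nil =>
    intro z f g _ hf hg
    simpa using pvG_fuel done f g z (by simpa using hf) hg
  | cons c u' ih =>
    intro z f g hstrong hf hg
    have hnone : pvPairs.find? (fun p => p.1.isPrefixOf ((c :: u') ++ z)) = none := by
      rw [List.find?_eq_none]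
      intro k hk hkp
      have hkpre : k.1 <+: (c :: u') ++ z := List.isPrefixOf_iff_prefix.mp (by simpa using hkp)
      have hsp := pvStrongT_spec hstrong (c :: u') List.suffix_rfl (by simp) k hk
      by_cases hl : k.1.length ≤ (c :: u').length
      · exact hsp.2 (List.prefix_of_prefix_length_le hkpre (List.prefix_append _ _) hl)
      · exact hsp.1 (List.prefix_of_prefix_length_le (List.prefix_append _ _) hkpre (by omega))
    cases f with
    | zero => simp at hf
    | succ f =>
      show pvG done (f + 1) (c :: (u' ++ z)) = _
      simp only [pvG, show pvPairs.find? (fun p => p.1.isPrefixOf (c :: (u' ++ z))) = none from hnone]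
      rw [ih z f g (pvStrongT_tail hstrong) (by simp at hf ⊢; omega) hg]
      rfl

lemma pvVerbatimTail (done : List (List Char × List Char)) :
    ∀ (u : List Char),
    (∀ k ∈ pvPairs, ∀ v, v <:+ u → v ≠ [] →
      (¬ k.1 <+: v) ∧ (v <+: k.1 → v ≠ k.1 → k ∉ done ∧ pvStrongT (k.1.drop v.length) = true)) →
    ∀ (z : List Char) (f g : Nat), (u ++ z).length ≤ f → z.length ≤ g →
    pvG done f (u ++ z) = u ++ pvG done g z := by
  intro u
  induction u with
  | nil =>
    intro _ z f g hf hg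
    simpa using pvG_fuel done f g z (by simpa using hf) hg
  | cons c u' ih =>
    intro H z f g hf hg
    cases f with
    | zero => simp at hf
    | succ f =>
      cases hfind : pvPairs.find? (fun p => p.1.isPrefixOf ((c :: u') ++ z)) with
      | none =>
        show pvG done (f + 1) (c :: (u' ++ z)) = _
        simp only [pvG, show pvPairs.find? (fun p => p.1.isPrefixOf (c :: (u' ++ z))) = none from hfind]
        rw [ih (fun k hk v hv hvne => H k hk v (hv.trans (List.suffix_cons c u')) hvne) z f g
          (by simp at hf ⊢; omega) hg]
        rfl
      | some k =>
        have hk : k ∈ pvPairs := List.mem_of_find?_eq_some hfind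
        have hkpre : k.1 <+: (c :: u') ++ z := by
          have h1 : k.1.isPrefixOf ((c :: u') ++ z) = true := by simpa using List.find?_some hfind
          exact List.isPrefixOf_iff_prefix.mp h1
        have hH := H k hk (c :: u') List.suffix_rfl (by simp)
        have hvk : (c :: u') <+: k.1 := by
          by_cases hl : k.1.length ≤ (c :: u').length
          · exact absurd (List.prefix_of_prefix_length_le hkpre (List.prefix_append _ _) hl) hH.1
          · exact List.prefix_of_prefix_length_le (List.prefix_append _ _) hkpre (by omega)
        have hne' : (c :: u') ≠ k.1 := by
          intro h; exact hH.1 (h ▸ List.prefix_rfl)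
        obtain ⟨hkdone, hstrong⟩ := hH.2 hvk hne'
        obtain ⟨rem, hrem⟩ := hvk
        have hremne : rem ≠ [] := by
          intro h; rw [h] at hrem; simp at hrem; exact hne' hrem
        have hremz : rem <+: z := by
          have : (c :: u') ++ rem <+: (c :: u') ++ z := by rw [hrem]; exact hkpre
          exact (List.prefix_append_right_inj _).mp this
        obtain ⟨z', hz'⟩ := hremz
        have hdropk : List.drop k.1.length ((c :: u') ++ z) = z' := by
          rw [← hz', ← hrem, ← List.append_assoc, List.drop_left]
        show pvG done (f + 1) (c :: (u' ++ z)) = _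
        have hfind' : pvPairs.find? (fun p => p.1.isPrefixOf (c :: (u' ++ z))) = some k := hfind
        simp only [pvG, hfind']
        rw [if_neg hkdone]
        show k.1 ++ pvG done f (List.drop k.1.length ((c :: u') ++ z)) = _
        rw [hdropk, ← hrem, ← hz']
        rw [List.append_assoc]
        congr 1
        have hremdrop : k.1.drop (c :: u').length = rem := by rw [← hrem, List.drop_left]
        have h1 : (rem ++ z').length ≤ g := by rw [hz']; exact hg
        have h2 : z'.length ≤ f := by
          have h := hf; rw [← hz'] at h; simp at h; omega
        rw [pvVerbatimStrong done rem z' g f (hremdrop ▸ hstrong) h1 h2]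


-- additional finite fact
lemma pv_valDropLast_not_in_key : ∀ q ∈ pvPairs, ∀ p ∈ pvPairs, ¬ q.2.dropLast <:+: p.1 := by decide

-- generic micro-helpers
lemma pv_infix_of_prefix_of_suffix {p v b : List Char} (h1 : p <+: v) (h2 : v <:+ b) : p <:+: b := by
  obtain ⟨w, hw⟩ := h1
  obtain ⟨u, hu⟩ := h2
  exact ⟨u, w, by rw [← hu, ← hw]; simp⟩

lemma pv_suffix_one {v b : List Char} (h : v <:+ b) (hl : v.length = 1) :
    ∃ ch, v = [ch] ∧ b.getLast? = some ch := by
  cases v with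
  | nil => simp at hl
  | cons ch w =>
    cases w with
    | nil =>
      obtain ⟨u, hu⟩ := h
      exact ⟨ch, rfl, by rw [← hu]; simp⟩
    | cons _ _ => simp at hl

lemma pv_cons_head_drop {l : List Char} {ch : Char} (h : l.head? = some ch) :
    l = ch :: l.drop 1 := by
  cases l with
  | nil => simp at h
  | cons a t => simp at h; subst h; rfl

lemma pv_drop1_prefix_of_cons {l x : List Char} {ch : Char} (h : l <+: ch :: x)
    (hh : l.head? = some ch) : l.drop 1 <+: x := by
  cases l with
  | nil => simp
  | cons a t =>
    simp only [List.head?_cons, Option.some.injEq] at hh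
    subst hh
    exact (List.cons_prefix_cons.mp h).2

lemma pv_take2_of_prefix {l : List Char} {c1 c2 : Char} {x : List Char}
    (h : l <+: c1 :: c2 :: x) (hl : 2 ≤ l.length) : l.take 2 = [c1, c2] := by
  cases l with
  | nil => simp at hl
  | cons a t =>
    cases t with
    | nil => simp at hl
    | cons b t' =>
      obtain ⟨ha, h2⟩ := List.cons_prefix_cons.mp h
      obtain ⟨hb, _⟩ := List.cons_prefix_cons.mp h2
      subst ha; subst hb; rfl

lemma pv_suffix_snoc {v b : List Char} {ch : Char} (h : v <:+ b) : v ++ [ch] <:+ b ++ [ch] := by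
  obtain ⟨u, hu⟩ := h
  exact ⟨u, by rw [← hu]; simp⟩

-- skip with a free fuel bound
lemma pvSkip' (p : List Char × List Char) (hp : p.1 ≠ []) (b x : List Char) (F : Nat)
    (hF : b.length + x.length ≤ F)
    (H : ∀ v, v <:+ b → v ≠ [] → ¬ p.1 <+: (v ++ x)) :
    pvRep1 p F (b ++ x) = b ++ pvRep1 p x.length x := by
  rw [pvRep1_fuel p hp F (b.length + x.length) (b ++ x) (by simpa using hF) (by simp)]
  exact pvSkip p b x x.length H

-- match at the head with a free fuel bound
lemma pvRep1_match (p : List Char × List Char) (hp : p.1 ≠ []) (x : List Char) (F : Nat)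
    (hF : p.1.length + x.length ≤ F) :
    pvRep1 p F (p.1 ++ x) = p.2 ++ pvRep1 p x.length x := by
  have h2 : 1 ≤ p.1.length := List.length_pos_iff.mpr hp
  rw [pvRep1_fuel p hp F (p.1.length + x.length) (p.1 ++ x) (by simpa using hF) (by simp)]
  obtain ⟨c0, k', hk⟩ := List.exists_cons_of_ne_nil hp
  have hsplit1 : p.1 ++ x = c0 :: (k' ++ x) := by rw [hk]; rfl
  have hlen : p.1.length + x.length = (k'.length + x.length) + 1 := by rw [hk]; simp; omega
  have hpp : p.1.isPrefixOf (c0 :: (k' ++ x)) = true := by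
    rw [← hsplit1]; exact List.isPrefixOf_iff_prefix.mpr (List.prefix_append p.1 x)
  rw [hlen, hsplit1]
  show pvRep1 p ((k'.length + x.length) + 1) (c0 :: (k' ++ x)) = _
  simp only [pvRep1, hpp, if_true]
  congr 1
  have hdrop : List.drop p.1.length (c0 :: (k' ++ x)) = x := by
    rw [← hsplit1, List.drop_left]
  rw [hdrop]
  exact pvRep1_fuel p hp (k'.length + x.length) x.length x (by omega) le_rfl

-- no straddle out of a full value piece followed by a rendering, unless the edge fires
lemma pv_val_skipH (R : List (List Char × List Char)) (w p : List Char × List Char)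
    (hw : w ∈ pvPairs) (hp : p ∈ pvPairs) (rest : List Char)
    (hnofire : ¬ ((w.2.getLast? == p.1.head?) = true ∧ (p.1.drop 1).isPrefixOf rest = true)) :
    ∀ v, v <:+ w.2 → v ≠ [] → ¬ p.1 <+: (v ++ pvG R rest.length rest) := by
  intro v hv hvne hcon
  have hp2 : 2 ≤ p.1.length := pv_keys_len2 p hp
  by_cases hl : p.1.length ≤ v.length
  · have : p.1 <+: v := List.prefix_of_prefix_length_le hcon (List.prefix_append v _) hl
    exact pv_key_not_in_val p hp w hw (pv_infix_of_prefix_of_suffix this hv)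
  · by_cases h2 : 2 ≤ v.length
    · have hvp : v <+: p.1 :=
        List.prefix_of_prefix_length_le (List.prefix_append v _) hcon (by omega)
      exact pv_chkV2 w hw v ((List.mem_tails _ _).mpr hv) h2 p hp ⟨hvp, by omega⟩
    · have hv1 : v.length = 1 := by
        have := List.length_pos_iff.mpr hvne; omega
      obtain ⟨ch, hvch, hlast⟩ := pv_suffix_one hv hv1
      subst hvch
      have hhead : p.1.head? = some ch := by
        obtain ⟨a, t, hat⟩ := List.exists_cons_of_ne_nil (show p.1 ≠ [] by intro h; simp [h] at hp2)
        rw [hat] at hcon ⊢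
        have := (List.cons_prefix_cons.mp (by simpa using hcon)).1
        simp [this]
      have hdr : p.1.drop 1 <+: pvG R rest.length rest := by
        apply pv_drop1_prefix_of_cons _ hhead
        simpa using hcon
      have hdrrest : p.1.drop 1 <+: rest := by
        apply pvPreG R rest.length rest (p.1.drop 1) le_rfl
          ⟨p, hp, List.drop_suffix 1 p.1⟩ _ hdr
        intro h
        have := congrArg List.length h
        simp at this; omega
      exact hnofire ⟨by rw [hlast, hhead]; simp, List.isPrefixOf_iff_prefix.mpr hdrrest⟩

-- common first cases of the truncated-piece skips
lemma pv_trunc_common (w p : List Char × List Char) (hw : w ∈ pvPairs) (hp : p ∈ pvPairs)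
    {v Y : List Char} (hv : v <:+ w.2.dropLast) (hvne : v ≠ [])
    (hcon : p.1 <+: (v ++ Y)) (hbig : ¬ p.1.length ≤ v.length) (h2 : ¬ 2 ≤ v.length) :
    ∃ ch, v = [ch] ∧ p.1.head? = some ch ∧ p.1.drop 1 <+: Y := by
  have hp2 : 2 ≤ p.1.length := pv_keys_len2 p hp
  have hv1 : v.length = 1 := by
    have := List.length_pos_iff.mpr hvne; omega
  obtain ⟨ch, hvch, _⟩ := pv_suffix_one hv hv1
  subst hvch
  have hhead : p.1.head? = some ch := by
    obtain ⟨a, t, hat⟩ := List.exists_cons_of_ne_nil (show p.1 ≠ [] by intro h; simp [h] at hp2)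
    rw [hat] at hcon ⊢
    have := (List.cons_prefix_cons.mp (by simpa using hcon)).1
    simp [this]
  exact ⟨ch, rfl, hhead, pv_drop1_prefix_of_cons (by simpa using hcon) hhead⟩

lemma pv_trunc_top (w p : List Char × List Char) (hw : w ∈ pvPairs) (hp : p ∈ pvPairs)
    {v Y : List Char} (hv : v <:+ w.2.dropLast) (hvne : v ≠ [])
    (hcon : p.1 <+: (v ++ Y)) (hbig : p.1.length ≤ v.length) : False := by
  have hpv : p.1 <+: v := List.prefix_of_prefix_length_le hcon (List.prefix_append v _) hbig
  have hvin : v <:+: w.2 :=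
    (List.IsSuffix.isInfix hv).trans (List.IsPrefix.isInfix (List.dropLast_prefix w.2))
  exact pv_key_not_in_val p hp w hw ((List.IsPrefix.isInfix hpv).trans hvin)

-- no straddle out of a truncated value piece followed by another value piece
lemma pv_truncH (w p w2 : List Char × List Char)
    (hw : w ∈ pvPairs) (hp : p ∈ pvPairs) (hw2 : w2 ∈ pvPairs) (Z : List Char) (Y : List Char)
    (hYs : Y = w2.2 ++ Z ∨ Y = w2.2.dropLast ++ Z) :
    ∀ v, v <:+ w.2.dropLast → v ≠ [] → ¬ p.1 <+: (v ++ Y) := by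
  intro v hv hvne hcon
  have hp2 : 2 ≤ p.1.length := pv_keys_len2 p hp
  by_cases hbig : p.1.length ≤ v.length
  · exact pv_trunc_top w p hw hp hv hvne hcon hbig
  by_cases h2 : 2 ≤ v.length
  · have hvp : v <+: p.1 :=
      List.prefix_of_prefix_length_le (List.prefix_append v _) hcon (by omega)
    exact pv_chkV2' w hw v ((List.mem_tails _ _).mpr hv) h2 p hp ⟨hvp, by omega⟩
  obtain ⟨ch, _, _, hdr⟩ := pv_trunc_common w p hw hp hv hvne hcon hbig h2
  have hd1 : 1 ≤ (p.1.drop 1).length := by simp; omega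
  rcases hYs with rfl | rfl
  · by_cases hl : (p.1.drop 1).length ≤ w2.2.length
    · exact pv_drop1_not_pre_val p hp w2 hw2
        (List.prefix_of_prefix_length_le hdr (List.prefix_append _ _) hl)
    · have : w2.2 <+: p.1.drop 1 :=
        List.prefix_of_prefix_length_le (List.prefix_append _ _) hdr (by omega)
      exact pv_val_not_in_key p hp w2 hw2
        ((List.IsPrefix.isInfix this).trans (List.IsSuffix.isInfix (List.drop_suffix 1 p.1)))
  · by_cases hl : (p.1.drop 1).length ≤ w2.2.dropLast.length
    · exact pv_drop1_not_pre_val p hp w2 hw2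
        ((List.prefix_of_prefix_length_le hdr (List.prefix_append _ _) hl).trans
          (List.dropLast_prefix w2.2))
    · have : w2.2.dropLast <+: p.1.drop 1 :=
        List.prefix_of_prefix_length_le (List.prefix_append _ _) hdr (by omega)
      exact pv_valDropLast_not_in_key w2 hw2 p hp
        ((List.IsPrefix.isInfix this).trans (List.IsSuffix.isInfix (List.drop_suffix 1 p.1)))

-- no straddle out of a truncated value piece when the value's own last char follows
lemma pv_truncH2 (w p : List Char × List Char) (hw : w ∈ pvPairs) (hp : p ∈ pvPairs)
    {ch : Char} (hch : w.2.getLast? = some ch) (W : List Char) :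
    ∀ v, v <:+ w.2.dropLast → v ≠ [] → ¬ p.1 <+: (v ++ (ch :: W)) := by
  intro v hv hvne hcon
  have hp2 : 2 ≤ p.1.length := pv_keys_len2 p hp
  by_cases hbig : p.1.length ≤ v.length
  · exact pv_trunc_top w p hw hp hv hvne hcon hbig
  by_cases h2 : 2 ≤ v.length
  · have hvp : v <+: p.1 :=
      List.prefix_of_prefix_length_le (List.prefix_append v _) hcon (by omega)
    exact pv_chkV2' w hw v ((List.mem_tails _ _).mpr hv) h2 p hp ⟨hvp, by omega⟩
  obtain ⟨pen, hvpen, _, _⟩ := pv_trunc_common w p hw hp hv hvne hcon hbig h2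
  subst hvpen
  have htake : p.1.take 2 = [pen, ch] := pv_take2_of_prefix (by simpa using hcon) hp2
  have hwne : w.2 ≠ [] := by intro h; rw [h] at hch; simp at hch
  have hsuf : [pen, ch] <:+ w.2 := by
    have h1 : [pen] ++ [ch] <:+ w.2.dropLast ++ [ch] := pv_suffix_snoc hv
    have h2' : w.2.dropLast ++ [ch] = w.2 := by
      have h3 := List.dropLast_append_getLast hwne
      have h4 : w.2.getLast hwne = ch := by
        have h5 := List.getLast?_eq_some_getLast (l := w.2) hwne
        rw [h5] at hch; simpa using hch
      rw [h4] at h3; exact h3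
    rwa [h2'] at h1
  exact pv_chkPen2 w hw p hp (htake ▸ hsuf)


-- two straddle candidates from the same value last char coincide
lemma pv_edge_unique (p p1 : List Char × List Char) (hp : p ∈ pvPairs) (hp1 : p1 ∈ pvPairs)
    (t' : List Char) (h1t : (p1.1.drop 1).isPrefixOf t' = true)
    (h2t : (p.1.drop 1).isPrefixOf t' = true) : p = p1 := by
  by_contra hne
  have d1 : p1.1.drop 1 <+: t' := List.isPrefixOf_iff_prefix.mp h1t
  have d2 : p.1.drop 1 <+: t' := List.isPrefixOf_iff_prefix.mp h2t
  by_cases hl : (p.1.drop 1).length ≤ (p1.1.drop 1).length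
  · exact pv_drop1_incomp p hp p1 hp1 hne (List.prefix_of_prefix_length_le d2 d1 hl)
  · exact pv_drop1_incomp p1 hp1 p hp (fun h => hne h.symm)
      (List.prefix_of_prefix_length_le d1 d2 (by omega))

-- one replace pass over the partial rendering advances `done` by its own key
lemma pvStepG (R Q : List (List Char × List Char)) (p : List Char × List Char)
    (hsplit : pvPairs = R ++ p :: Q) (hpR : p ∉ R)
    (hE : ∀ q ∈ Q, ∀ v ∈ q.1.tails, v ≠ [] →
      ¬ p.1 <+: v ∧ ¬ (v <+: p.1 ∧ v.length < p.1.length))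
    (hTail : ∀ k ∈ pvPairs, ∀ v ∈ (p.1.drop 1).tails, v ≠ [] →
      (¬ k.1 <+: v) ∧ (v <+: k.1 → v ≠ k.1 → k ∉ R ∧ pvStrongT (k.1.drop v.length) = true))
    (hEdge2 : ∀ p2 ∈ pvPairs, (p.2.getLast? == p2.1.head?) = true → p2 ∉ R ++ [p]) :
    ∀ (n : Nat) (s : List Char), s.length ≤ n →
    pvRep1 p (pvG R s.length s).length (pvG R s.length s) = pvG (R ++ [p]) s.length s := by
  have hpP : p ∈ pvPairs := by
    rw [hsplit]; exact List.mem_append_right _ (List.mem_cons_self ..)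
  have hp1 : p.1 ≠ [] := pv_keys_ne_nil p hpP
  have hp2 : 2 ≤ p.1.length := pv_keys_len2 p hpP
  have hTail' : ∀ k ∈ pvPairs, ∀ v, v <:+ (p.1.drop 1) → v ≠ [] →
      (¬ k.1 <+: v) ∧ (v <+: k.1 → v ≠ k.1 → k ∉ R ∧ pvStrongT (k.1.drop v.length) = true) :=
    fun k hk v hv => hTail k hk v ((List.mem_tails _ _).mpr hv)
  intro n
  induction n with
  | zero =>
    intro s hlen
    have : s = [] := List.eq_nil_of_length_eq_zero (Nat.le_zero.mp hlen)
    subst this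
    rw [pvG_nil, pvG_nil, pvRep1_nil]
  | succ n ih =>
    intro s hlen
    cases s with
    | nil => rw [pvG_nil, pvG_nil, pvRep1_nil]
    | cons c t =>
      simp only [List.length_cons] at hlen
      cases hfind : pvPairs.find? (fun q => q.1.isPrefixOf (c :: t)) with
      | none =>
        have hL : pvG R (c :: t).length (c :: t) = c :: pvG R t.length t := by
          simp only [List.length_cons, pvG, hfind]
        have hR2 : pvG (R ++ [p]) (c :: t).length (c :: t) = c :: pvG (R ++ [p]) t.length t := by
          simp only [List.length_cons, pvG, hfind]
        have hnp : ¬ p.1.isPrefixOf (c :: pvG R t.length t) := by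
          intro hb
          have hpre : p.1 <+: pvG R (c :: t).length (c :: t) := by
            rw [hL]; exact List.isPrefixOf_iff_prefix.mp hb
          have := pvPreG R (c :: t).length (c :: t) p.1 le_rfl ⟨p, hpP, List.suffix_rfl⟩ hp1 hpre
          exact (List.find?_eq_none.mp hfind p hpP) (List.isPrefixOf_iff_prefix.mpr this)
        rw [hL, hR2]
        show pvRep1 p ((pvG R t.length t).length + 1) (c :: pvG R t.length t) = _
        simp only [pvRep1, hnp, Bool.false_eq_true, if_false]
        rw [ih t (by omega)]
      | some q =>
        have hqmem : q ∈ pvPairs := List.mem_of_find?_eq_some hfind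
        have hq1 : q.1 ≠ [] := pv_keys_ne_nil q hqmem
        have hq2 : 2 ≤ q.1.length := pv_keys_len2 q hqmem
        have hqv : q.2 ≠ [] := pv_vals_ne_nil q hqmem
        have hqpre : q.1 <+: (c :: t) := by
          have h1 : q.1.isPrefixOf (c :: t) = true := by simpa using List.find?_some hfind
          exact List.isPrefixOf_iff_prefix.mp h1
        obtain ⟨t', ht'⟩ := hqpre
        have hdrop : List.drop q.1.length (c :: t) = t' := by rw [← ht', List.drop_left]
        have hlt : t'.length + q.1.length = t.length + 1 := by
          have := congrArg List.length ht'
          simp at this; omega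
        have hIH := ih t' (by omega)
        have hfuel : pvG R t.length t' = pvG R t'.length t' :=
          pvG_fuel R t.length t'.length t' (by omega) le_rfl
        have hfuel' : pvG (R ++ [p]) t.length t' = pvG (R ++ [p]) t'.length t' :=
          pvG_fuel (R ++ [p]) t.length t'.length t' (by omega) le_rfl
        simp only [List.length_cons, pvG, hfind, hdrop, hfuel, hfuel']
        by_cases hqR : q ∈ R
        · rw [if_pos hqR, if_pos (List.mem_append_left _ hqR)]
          cases hedge1 : pvEdge q.2 t' with
          | none =>
            dsimp only
            -- skip the plain value block
            have hnofire : ¬ ((q.2.getLast? == p.1.head?) = true ∧ (p.1.drop 1).isPrefixOf t' = true) := by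
              intro ⟨h1, h2⟩
              exact (List.find?_eq_none.mp hedge1 p hpP) (by simp only [h1, h2, Bool.and_self])
            rw [pvSkip' p hp1 q.2 (pvG R t'.length t') _ (by simp)
              (pv_val_skipH R q p hqmem hpP t' hnofire), hIH]
          | some p1 =>
            have hp1mem : p1 ∈ pvPairs := List.mem_of_find?_eq_some hedge1
            have hpred := List.find?_some hedge1
            have hp1head : (q.2.getLast? == p1.1.head?) = true := by
              simp only [Bool.and_eq_true] at hpred; exact hpred.1
            have hp1tail : (p1.1.drop 1).isPrefixOf t' = true := by
              simp only [Bool.and_eq_true] at hpred; exact hpred.2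
            have hp1v : p1.2 ≠ [] := pv_vals_ne_nil p1 hp1mem
            obtain ⟨chq, hchq⟩ := Option.ne_none_iff_exists'.mp
              (show q.2.getLast? ≠ none by rw [Ne, List.getLast?_eq_none_iff]; exact hqv)
            obtain ⟨t'', ht''⟩ := List.isPrefixOf_iff_prefix.mp hp1tail
            have hp1l : 2 ≤ p1.1.length := pv_keys_len2 p1 hp1mem
            have hrest1 : List.drop (p1.1.length - 1) t' = t'' := by
              rw [← ht'']
              have : p1.1.length - 1 = (p1.1.drop 1).length := by simp
              rw [this, List.drop_left]
            dsimp only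
            by_cases hp1R : p1 ∈ R
            · rw [if_pos hp1R, if_pos (List.mem_append_left _ hp1R), hrest1]
              have hlt1 : t''.length < t'.length := by
                have := congrArg List.length ht''
                simp at this; omega
              have hIH2 := ih t'' (by omega)
              have hfuelB : pvG R t.length t'' = pvG R t''.length t'' :=
                pvG_fuel R t.length t''.length t'' (by omega) le_rfl
              have hfuelB' : pvG (R ++ [p]) t.length t'' = pvG (R ++ [p]) t''.length t'' :=
                pvG_fuel (R ++ [p]) t.length t''.length t'' (by omega) le_rfl
              rw [hfuelB, hfuelB']
              cases hedge2 : pvEdge p1.2 t'' with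
              | none =>
                dsimp only
                -- skip q.2.dropLast then p1.2
                have hnofire2 : ¬ ((p1.2.getLast? == p.1.head?) = true ∧ (p.1.drop 1).isPrefixOf t'' = true) := by
                  intro ⟨h1, h2⟩
                  exact (List.find?_eq_none.mp hedge2 p hpP) (by simp only [h1, h2, Bool.and_self])
                rw [List.append_assoc]
                rw [pvSkip' p hp1 q.2.dropLast (p1.2 ++ pvG R t''.length t'') _ (by simp)
                  (fun v hv hvne => pv_truncH q p p1 hqmem hpP hp1mem (pvG R t''.length t'')
                    _ (Or.inl rfl) v hv hvne)]
                rw [pvSkip' p hp1 p1.2 (pvG R t''.length t'') _ (by simp)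
                  (pv_val_skipH R p1 p hp1mem hpP t'' hnofire2), hIH2, List.append_assoc]
              | some p2 =>
                have hp2mem : p2 ∈ pvPairs := List.mem_of_find?_eq_some hedge2
                have hpred2 := List.find?_some hedge2
                have hp2head : (p1.2.getLast? == p2.1.head?) = true := by
                  simp only [Bool.and_eq_true] at hpred2; exact hpred2.1
                have hp2tail : (p2.1.drop 1).isPrefixOf t'' = true := by
                  simp only [Bool.and_eq_true] at hpred2; exact hpred2.2
                dsimp only
                by_cases hp2R : p2 ∈ R
                · rw [if_pos hp2R, if_pos (List.mem_append_left _ hp2R)]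
                  obtain ⟨t3, ht3⟩ := List.isPrefixOf_iff_prefix.mp hp2tail
                  have hp2l : 2 ≤ p2.1.length := pv_keys_len2 p2 hp2mem
                  have hrest2 : List.drop (p2.1.length - 1) t'' = t3 := by
                    rw [← ht3]
                    have : p2.1.length - 1 = (p2.1.drop 1).length := by simp
                    rw [this, List.drop_left]
                  rw [hrest2]
                  have hlt2 : t3.length < t''.length := by
                    have := congrArg List.length ht3
                    simp at this; omega
                  have hIH3 := ih t3 (by omega)
                  have hfuelC : pvG R t.length t3 = pvG R t3.length t3 :=
                    pvG_fuel R t.length t3.length t3 (by omega) le_rfl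
                  have hfuelC' : pvG (R ++ [p]) t.length t3 = pvG (R ++ [p]) t3.length t3 :=
                    pvG_fuel (R ++ [p]) t.length t3.length t3 (by omega) le_rfl
                  rw [hfuelC, hfuelC']
                  have hno2hop : ¬ ((p2.2.getLast? == p.1.head?) = true ∧ (p.1.drop 1).isPrefixOf t3 = true) := by
                    intro ⟨h1, _⟩
                    have := pv_chk2hop q hqmem p1 hp1mem p2 hp2mem p hpP hp1head hp2head
                    rw [this] at h1; exact Bool.false_ne_true h1
                  simp only [List.append_assoc]
                  rw [pvSkip' p hp1 q.2.dropLast _ _ (by simp)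
                    (fun v hv hvne => pv_truncH q p p1 hqmem hpP hp1mem
                      (p2.2 ++ pvG R t3.length t3) _ (Or.inr rfl) v hv hvne)]
                  rw [pvSkip' p hp1 p1.2.dropLast _ _ (by simp)
                    (fun v hv hvne => pv_truncH p1 p p2 hp1mem hpP hp2mem (pvG R t3.length t3)
                      _ (Or.inl rfl) v hv hvne)]
                  rw [pvSkip' p hp1 p2.2 _ _ (by simp)
                    (pv_val_skipH R p2 p hp2mem hpP t3 hno2hop), hIH3]
                · by_cases hp2p : p2 = p
                  · -- FIRING at depth 2
                    subst hp2p
                    rw [if_neg hp2R, if_pos (List.mem_append_right _ (List.mem_cons_self ..))]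
                    obtain ⟨t3, ht3⟩ := List.isPrefixOf_iff_prefix.mp hp2tail
                    have hrest2 : List.drop (p2.1.length - 1) t'' = t3 := by
                      rw [← ht3]
                      have : p2.1.length - 1 = (p2.1.drop 1).length := by simp
                      rw [this, List.drop_left]
                    rw [hrest2]
                    have hlt2 : t3.length < t''.length := by
                      have := congrArg List.length ht3
                      simp at this; omega
                    have hIH3 := ih t3 (by omega)
                    have hfuelC' : pvG (R ++ [p2]) t.length t3 = pvG (R ++ [p2]) t3.length t3 :=
                      pvG_fuel (R ++ [p2]) t.length t3.length t3 (by omega) le_rfl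
                    rw [hfuelC']
                    -- rewrite the rendering of t'' through the tail
                    have hverb : pvG R t''.length t'' = p2.1.drop 1 ++ pvG R t3.length t3 := by
                      conv_lhs => rw [← ht3]
                      exact pvVerbatimTail R (p2.1.drop 1) hTail' t3
                        ((p2.1.drop 1 ++ t3).length) t3.length le_rfl le_rfl
                    rw [hverb]
                    obtain ⟨chp, hchp⟩ := Option.ne_none_iff_exists'.mp
                      (show p1.2.getLast? ≠ none by
                        rw [Ne, List.getLast?_eq_none_iff]; exact pv_vals_ne_nil p1 hp1mem)
                    have hheadp : p2.1.head? = some chp := by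
                      have := (beq_iff_eq).mp hp2head
                      rw [hchp] at this; exact this.symm
                    have hp1split : p1.2 = p1.2.dropLast ++ [chp] := by
                      have h3 := List.dropLast_append_getLast (l := p1.2) (pv_vals_ne_nil p1 hp1mem)
                      have h4 : p1.2.getLast (pv_vals_ne_nil p1 hp1mem) = chp := by
                        have h5 := List.getLast?_eq_some_getLast (l := p1.2) (pv_vals_ne_nil p1 hp1mem)
                        rw [h5] at hchp; simpa using hchp
                      rw [h4] at h3; exact h3.symm
                    simp only [List.append_assoc]
                    rw [pvSkip' p2 hp1 q.2.dropLast _ _ (by simp)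
                      (fun v hv hvne => pv_truncH q p2 p1 hqmem hpP hp1mem
                        (p2.1.drop 1 ++ pvG R t3.length t3) _
                        (Or.inl rfl) v hv hvne)]
                    conv_lhs => rw [hp1split]
                    simp only [List.append_assoc, List.singleton_append]
                    rw [pvSkip' p2 hp1 p1.2.dropLast _ _ (by simp)
                      (pv_truncH2 p1 p2 hp1mem hpP hchp _)]
                    rw [show (chp :: (p2.1.drop 1 ++ pvG R t3.length t3))
                        = p2.1 ++ pvG R t3.length t3 from by
                      conv_rhs => rw [pv_cons_head_drop hheadp]
                      rw [List.cons_append]]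
                    rw [pvRep1_match p2 hp1 _ _ (by simp), hIH3]
                  · -- pending at depth 2
                    rw [if_neg hp2R, if_neg (by
                      intro h
                      rcases List.mem_append.mp h with h | h
                      · exact hp2R h
                      · exact hp2p (List.mem_singleton.mp h))]
                    have hnofire2 : ¬ ((p1.2.getLast? == p.1.head?) = true ∧ (p.1.drop 1).isPrefixOf t'' = true) := by
                      intro ⟨h1, h2⟩
                      exact hp2p (pv_edge_unique p p2 hpP hp2mem t'' hp2tail h2).symm
                    rw [List.append_assoc]
                    rw [pvSkip' p hp1 q.2.dropLast (p1.2 ++ pvG R t''.length t'') _ (by simp)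
                      (fun v hv hvne => pv_truncH q p p1 hqmem hpP hp1mem (pvG R t''.length t'')
                        _ (Or.inl rfl) v hv hvne)]
                    rw [pvSkip' p hp1 p1.2 (pvG R t''.length t'') _ (by simp)
                      (pv_val_skipH R p1 p hp1mem hpP t'' hnofire2), hIH2, List.append_assoc]
            · by_cases hp1p : p1 = p
              · -- FIRING at depth 1
                subst hp1p
                rw [if_neg hp1R, if_pos (List.mem_append_right _ (List.mem_cons_self ..)), hrest1]
                have hIH2 := ih t'' (by
                  have := congrArg List.length ht''
                  simp at this; omega)
                have hfuelB' : pvG (R ++ [p1]) t.length t'' = pvG (R ++ [p1]) t''.length t'' :=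
                  pvG_fuel (R ++ [p1]) t.length t''.length t''
                    (by have := congrArg List.length ht''; simp at this; omega) le_rfl
                rw [hfuelB']
                have hverb : pvG R t'.length t' = p1.1.drop 1 ++ pvG R t''.length t'' := by
                  rw [← ht'']
                  exact pvVerbatimTail R (p1.1.drop 1) hTail' t''
                    ((p1.1.drop 1 ++ t'').length) t''.length le_rfl le_rfl
                rw [hverb]
                have hheadp : p1.1.head? = some chq := by
                  have := (beq_iff_eq).mp hp1head
                  rw [hchq] at this; exact this.symm
                have hqsplit : q.2 = q.2.dropLast ++ [chq] := by
                  have h3 := List.dropLast_append_getLast (l := q.2) hqv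
                  have h4 : q.2.getLast hqv = chq := by
                    have h5 := List.getLast?_eq_some_getLast (l := q.2) hqv
                    rw [h5] at hchq; simpa using hchq
                  rw [h4] at h3; exact h3.symm
                conv_lhs => rw [hqsplit]
                simp only [List.append_assoc, List.singleton_append]
                rw [pvSkip' p1 hp1 q.2.dropLast _ _ (by simp)
                  (pv_truncH2 q p1 hqmem hpP hchq _)]
                rw [show (chq :: (p1.1.drop 1 ++ pvG R t''.length t''))
                    = p1.1 ++ pvG R t''.length t'' from by
                  conv_rhs => rw [pv_cons_head_drop hheadp]
                  rw [List.cons_append]]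
                rw [pvRep1_match p1 hp1 _ _ (by simp), hIH2]
                cases hedge2 : pvEdge p1.2 t'' with
                | none => dsimp only
                | some p2' =>
                  dsimp only
                  have hp2'mem : p2' ∈ pvPairs := List.mem_of_find?_eq_some hedge2
                  have hh : (p1.2.getLast? == p2'.1.head?) = true := by
                    have := List.find?_some hedge2
                    simp only [Bool.and_eq_true] at this; exact this.1
                  rw [if_neg (hEdge2 p2' hp2'mem hh)]
              · -- pending at depth 1
                rw [if_neg hp1R, if_neg (by
                  intro h
                  rcases List.mem_append.mp h with h | h
                  · exact hp1R h
                  · exact hp1p (List.mem_singleton.mp h))]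
                have hnofire : ¬ ((q.2.getLast? == p.1.head?) = true ∧ (p.1.drop 1).isPrefixOf t' = true) := by
                  intro ⟨h1, h2⟩
                  exact hp1p (pv_edge_unique p p1 hpP hp1mem t' hp1tail h2).symm
                rw [pvSkip' p hp1 q.2 (pvG R t'.length t') _ (by simp)
                  (pv_val_skipH R q p hqmem hpP t' hnofire), hIH]
        · -- q not yet replaced
          by_cases hqp : q = p
          · subst hqp
            rw [if_neg hqR, if_pos (List.mem_append_right _ (List.mem_cons_self ..))]
            rw [pvRep1_match q hp1 _ _ (by simp), hIH]
            cases hedge1 : pvEdge q.2 t' with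
            | none => dsimp only
            | some p1 =>
              dsimp only
              have hp1mem : p1 ∈ pvPairs := List.mem_of_find?_eq_some hedge1
              have hp1head : (q.2.getLast? == p1.1.head?) = true := by
                have := List.find?_some hedge1
                simp only [Bool.and_eq_true] at this; exact this.1
              rw [if_neg (hEdge2 p1 hp1mem hp1head)]
          · -- q strictly after p in the table
            have hqQ : q ∈ Q := by
              have hq := hqmem
              rw [hsplit] at hq
              rcases List.mem_append.mp hq with h | h
              · exact absurd h hqR
              · rcases List.mem_cons.mp h with h | h
                · exact absurd h hqp
                · exact h
            rw [if_neg hqR, if_neg (by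
              intro h
              rcases List.mem_append.mp h with h | h
              · exact hqR h
              · exact hqp (List.mem_singleton.mp h))]
            rw [pvSkip' p hp1 q.1 (pvG R t'.length t') _ (by simp) (fun v hv hvne hcon => by
              by_cases hl : p.1.length ≤ v.length
              · exact (hE q hqQ v ((List.mem_tails _ _).mpr hv) hvne).1
                  (List.prefix_of_prefix_length_le hcon (List.prefix_append v _) hl)
              · exact (hE q hqQ v ((List.mem_tails _ _).mpr hv) hvne).2
                  ⟨List.prefix_of_prefix_length_le (List.prefix_append v _) hcon (by omega), by omega⟩)]
            rw [hIH]

-- more finite facts used by the comparison lemmas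
lemma pv_keys_prefree : ∀ a ∈ pvPairs, ∀ b ∈ pvPairs, a.1 <+: b.1 → a = b := by decide
lemma pv_trig_ne_nil : ∀ tr ∈ pvTriggers, tr.toList ≠ [] := by decide
lemma pv_trig_long : ∀ tr ∈ pvTriggers, 15 ≤ tr.toList.length := by decide
lemma pv_keys_short : ∀ p ∈ pvPairs, p.1.length ≤ 14 := by decide
lemma pv_vals_len2 : ∀ p ∈ pvPairs, 2 ≤ p.2.length := by decide
lemma pv_headne : ∀ q ∈ pvPairs, ∀ p1 ∈ pvPairs, (q.2.getLast? == p1.1.head?) = true →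
    p1 ≠ ("approximately".toList, "about".toList) → (p1.2.head? == p1.1.head?) = false := by decide
lemma pv_about_noedge : ∀ k ∈ pvPairs,
    ((("about".toList : List Char)).getLast? == k.1.head?) = false := by decide
lemma pv_no_pp : ∀ k ∈ pvPairs, ¬ (k.1.take 2 = ['p', 'p']) := by decide

lemma pvScan_nil (f : Nat) : pvScan f [] = [] := by cases f <;> rfl

lemma pvScan_fuel : ∀ (f g : Nat) (l : List Char), l.length ≤ f → l.length ≤ g →
    pvScan f l = pvScan g l := by
  intro f
  induction f with
  | zero =>
    intro g l h1 _
    have : l = [] := List.eq_nil_of_length_eq_zero (Nat.le_zero.mp h1)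
    subst this; rw [pvScan_nil, pvScan_nil]
  | succ f ih =>
    intro g l h1 h2
    cases g with
    | zero =>
      have : l = [] := List.eq_nil_of_length_eq_zero (Nat.le_zero.mp h2)
      subst this; rw [pvScan_nil, pvScan_nil]
    | succ g =>
      cases l with
      | nil => rw [pvScan_nil, pvScan_nil]
      | cons c t =>
        simp only [List.length_cons] at h1 h2
        cases hfind : pvPairs.find? (fun p => p.1.isPrefixOf (c :: t)) with
        | none =>
          simp only [pvScan, hfind]
          rw [ih g t (by omega) (by omega)]
        | some q =>
          have hq2 : 2 ≤ q.1.length := pv_keys_len2 q (List.mem_of_find?_eq_some hfind)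
          simp only [pvScan, hfind]
          congr 1
          exact ih g _ (by simp [List.length_drop]; omega) (by simp [List.length_drop]; omega)

-- the full replace chain is the fully-rendered cascade scan
lemma pv_chainG (s : List Char) :
    pvPairs.foldl (fun l q => PySem.Chars.replace l q.1 q.2) s = pvG pvPairs s.length s := by
  have step : ∀ (R Q : List (List Char × List Char)) (p : List Char × List Char),
      pvPairs = R ++ p :: Q → p ∉ R →
      (∀ q ∈ Q, ∀ v ∈ q.1.tails, v ≠ [] →
        ¬ p.1 <+: v ∧ ¬ (v <+: p.1 ∧ v.length < p.1.length)) →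
      (∀ k ∈ pvPairs, ∀ v ∈ (p.1.drop 1).tails, v ≠ [] →
        (¬ k.1 <+: v) ∧ (v <+: k.1 → v ≠ k.1 → k ∉ R ∧ pvStrongT (k.1.drop v.length) = true)) →
      (∀ p2 ∈ pvPairs, (p.2.getLast? == p2.1.head?) = true → p2 ∉ R ++ [p]) →
      PySem.Chars.replace (pvG R s.length s) p.1 p.2 = pvG (R ++ [p]) s.length s := by
    intro R Q p h1 h2 h3 h4 h5
    rw [pv_replace_eq _ _ _ (pv_keys_ne_nil p (by
      rw [h1]; exact List.mem_append_right _ (List.mem_cons_self ..)))]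
    exact pvStepG R Q p h1 h2 h3 h4 h5 s.length s le_rfl
  simp only [pvPairs, List.foldl_cons, List.foldl_nil]
  conv_lhs => rw [show s = pvG [] s.length s from (pvG_empty_done s.length s le_rfl).symm]
  rw [step [] _ _ rfl (by decide) (by decide) (by decide) (by decide)]
  simp only [List.nil_append]
  rw [step [("fundamental".toList, "basic".toList)] _ _ rfl (by decide) (by decide) (by decide) (by decide)]
  simp only [List.cons_append, List.nil_append]
  rw [step [("fundamental".toList, "basic".toList), ("systematically".toList, "step by step".toList)] _ _ rfl (by decide) (by decide) (by decide) (by decide)]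
  simp only [List.cons_append, List.nil_append]
  rw [step [("fundamental".toList, "basic".toList), ("systematically".toList, "step by step".toList), ("perspective".toList, "way of looking at it".toList)] _ _ rfl (by decide) (by decide) (by decide) (by decide)]
  simp only [List.cons_append, List.nil_append]
  rw [step [("fundamental".toList, "basic".toList), ("systematically".toList, "step by step".toList), ("perspective".toList, "way of looking at it".toList), ("component".toList, "part".toList)] _ _ rfl (by decide) (by decide) (by decide) (by decide)]
  simp only [List.cons_append, List.nil_append]
  rw [step [("fundamental".toList, "basic".toList), ("systematically".toList, "step by step".toList), ("perspective".toList, "way of looking at it".toList), ("component".toList, "part".toList), ("concept".toList, "idea".toList)] _ _ rfl (by decide) (by decide) (by decide) (by decide)]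
  simp only [List.cons_append, List.nil_append]
  rw [step [("fundamental".toList, "basic".toList), ("systematically".toList, "step by step".toList), ("perspective".toList, "way of looking at it".toList), ("component".toList, "part".toList), ("concept".toList, "idea".toList), ("principle".toList, "rule".toList)] _ _ rfl (by decide) (by decide) (by decide) (by decide)]
  simp only [List.cons_append, List.nil_append]
  rw [step [("fundamental".toList, "basic".toList), ("systematically".toList, "step by step".toList), ("perspective".toList, "way of looking at it".toList), ("component".toList, "part".toList), ("concept".toList, "idea".toList), ("principle".toList, "rule".toList), ("calculate".toList, "figure out".toList)] _ _ rfl (by decide) (by decide) (by decide) (by decide)]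
  simp only [List.cons_append, List.nil_append]
  rw [step [("fundamental".toList, "basic".toList), ("systematically".toList, "step by step".toList), ("perspective".toList, "way of looking at it".toList), ("component".toList, "part".toList), ("concept".toList, "idea".toList), ("principle".toList, "rule".toList), ("calculate".toList, "figure out".toList), ("efficient".toList, "fast".toList)] _ _ rfl (by decide) (by decide) (by decide) (by decide)]
  simp only [List.cons_append, List.nil_append]

-- without a trigger the cascade never fires: full rendering = the single scan of B
lemma pv_offTrig : ∀ (n : Nat) (s : List Char), s.length ≤ n →
    (∀ tr ∈ pvTriggers, ¬ tr.toList <:+: s) →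
    pvG pvPairs s.length s = pvScan s.length s := by
  intro n
  induction n with
  | zero =>
    intro s hlen _
    have : s = [] := List.eq_nil_of_length_eq_zero (Nat.le_zero.mp hlen)
    subst this; rfl
  | succ n ih =>
    intro s hlen hnt
    cases s with
    | nil => rfl
    | cons c t =>
      simp only [List.length_cons] at hlen
      cases hfind : pvPairs.find? (fun p => p.1.isPrefixOf (c :: t)) with
      | none =>
        simp only [List.length_cons, pvG, pvScan, hfind]
        rw [ih t (by omega) (fun tr htr hinf =>
          hnt tr htr (hinf.trans (List.IsSuffix.isInfix (List.suffix_cons c t))))]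
      | some q =>
        have hqmem : q ∈ pvPairs := List.mem_of_find?_eq_some hfind
        have hq2 : 2 ≤ q.1.length := pv_keys_len2 q hqmem
        have hqpre : q.1 <+: (c :: t) := by
          have h1 : q.1.isPrefixOf (c :: t) = true := by simpa using List.find?_some hfind
          exact List.isPrefixOf_iff_prefix.mp h1
        obtain ⟨t', ht'⟩ := hqpre
        have hdrop : List.drop q.1.length (c :: t) = t' := by rw [← ht', List.drop_left]
        have hlt : t'.length + q.1.length = t.length + 1 := by
          have := congrArg List.length ht'
          simp at this; omega
        have hnt' : ∀ tr ∈ pvTriggers, ¬ tr.toList <:+: t' := fun tr htr hinf =>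
          hnt tr htr (hinf.trans (List.IsSuffix.isInfix ⟨q.1, ht'⟩))
        simp only [List.length_cons, pvG, pvScan, hfind, hdrop]
        rw [if_pos hqmem]
        cases hedge1 : pvEdge q.2 t' with
        | none =>
          dsimp only
          rw [pvG_fuel pvPairs t.length t'.length t' (by omega) le_rfl,
            pvScan_fuel t.length t'.length t' (by omega) le_rfl,
            ih t' (by omega) hnt']
        | some p1 =>
          exfalso
          have hp1mem : p1 ∈ pvPairs := List.mem_of_find?_eq_some hedge1
          have hpred := List.find?_some hedge1
          simp only [Bool.and_eq_true] at hpred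
          have htrig := pv_edge_trig q hqmem p1 hp1mem hpred.1
          obtain ⟨tr, htr, heq⟩ := List.mem_map.mp htrig
          apply hnt tr htr
          have hpre : tr.toList <+: (c :: t) := by
            rw [heq, ← ht']
            exact (List.prefix_append_right_inj q.1).mpr
              (List.isPrefixOf_iff_prefix.mp hpred.2)
          exact hpre.isInfix

lemma pv_neq_head {a x y : List Char} {cx cy : Char} {X Y : List Char}
    (hx : x = cx :: X) (hy : y = cy :: Y) (hne : cx ≠ cy) : a ++ x ≠ a ++ y := by
  intro h
  have h1 := List.append_cancel_left h
  rw [hx, hy] at h1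
  exact hne ((List.cons.injEq ..).mp h1).1

lemma pv_neq_second {a : List Char} {c b1 b2 : Char} {X Y : List Char}
    (hne : b1 ≠ b2) : a ++ (c :: b1 :: X) ≠ a ++ (c :: b2 :: Y) := by
  intro h
  have h1 := List.append_cancel_left h
  have h2 := (List.cons.injEq ..).mp h1
  have h3 := (List.cons.injEq ..).mp h2.2
  exact hne h3.1

-- with a trigger the cascade fires and the two outputs differ
lemma pv_onTrig : ∀ (n : Nat) (s : List Char), s.length ≤ n →
    (∃ tr ∈ pvTriggers, tr.toList <:+: s) →
    pvG pvPairs s.length s ≠ pvScan s.length s := by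
  have hfindpp : ∀ (w : List Char),
      pvPairs.find? (fun k => k.1.isPrefixOf ('p' :: 'p' :: w)) = none := by
    intro w
    rw [List.find?_eq_none]
    intro k hk hkp
    have hkpre : k.1 <+: 'p' :: 'p' :: w := by simpa using hkp
    exact pv_no_pp k hk (pv_take2_of_prefix hkpre (pv_keys_len2 k hk))
  intro n
  induction n with
  | zero =>
    intro s hlen hex
    obtain ⟨tr, htr, hinf⟩ := hex
    have : s = [] := List.eq_nil_of_length_eq_zero (Nat.le_zero.mp hlen)
    subst this
    exact absurd (List.eq_nil_of_infix_nil hinf) (pv_trig_ne_nil tr htr)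
  | succ n ih =>
    intro s hlen hex
    obtain ⟨tr, htr, hinf⟩ := hex
    cases s with
    | nil => exact absurd (List.eq_nil_of_infix_nil hinf) (pv_trig_ne_nil tr htr)
    | cons c t =>
      simp only [List.length_cons] at hlen
      obtain ⟨q0, hq0mem, p0, hp0mem, htrshape, hhead0⟩ := pv_trig_shape tr htr
      cases hfind : pvPairs.find? (fun p => p.1.isPrefixOf (c :: t)) with
      | none =>
        have hsub : tr.toList <:+: t := by
          rcases List.infix_cons_iff.mp hinf with hpre | hsub
          · exfalso
            have hq0pre : q0.1 <+: c :: t :=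
              (htrshape ▸ List.prefix_append q0.1 (p0.1.drop 1)).trans hpre
            exact (List.find?_eq_none.mp hfind q0 hq0mem)
              (List.isPrefixOf_iff_prefix.mpr hq0pre)
          · exact hsub
        simp only [List.length_cons, pvG, pvScan, hfind]
        intro heq
        exact ih t (by omega) ⟨tr, htr, hsub⟩ ((List.cons.injEq ..).mp heq).2
      | some q =>
        have hqmem : q ∈ pvPairs := List.mem_of_find?_eq_some hfind
        have hq2 : 2 ≤ q.1.length := pv_keys_len2 q hqmem
        have hqv : q.2 ≠ [] := pv_vals_ne_nil q hqmem
        have hqpre : q.1 <+: (c :: t) := by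
          have h1 : q.1.isPrefixOf (c :: t) = true := by simpa using List.find?_some hfind
          exact List.isPrefixOf_iff_prefix.mp h1
        obtain ⟨t', ht'⟩ := hqpre
        have hdrop : List.drop q.1.length (c :: t) = t' := by rw [← ht', List.drop_left]
        have hlt : t'.length + q.1.length = t.length + 1 := by
          have := congrArg List.length ht'
          simp at this; omega
        simp only [List.length_cons, pvG, pvScan, hfind, hdrop]
        rw [if_pos hqmem]
        rw [pvScan_fuel t.length t'.length t' (by omega) le_rfl]
        cases hedge1 : pvEdge q.2 t' with
        | none =>
          dsimp only
          rw [pvG_fuel pvPairs t.length t'.length t' (by omega) le_rfl]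
          have hsub : tr.toList <:+: t' := by
            obtain ⟨u, w, huw⟩ := hinf
            by_cases hu : q.1.length ≤ u.length
            · have hupre : u <+: c :: t := ⟨tr.toList ++ w, by rw [← huw]; simp⟩
              have hq1u : q.1 <+: u :=
                List.prefix_of_prefix_length_le ⟨t', ht'⟩ hupre hu
              obtain ⟨u', hu'⟩ := hq1u
              refine ⟨u', w, ?_⟩
              have hcan : q.1 ++ (u' ++ (tr.toList ++ w)) = q.1 ++ t' := by
                rw [← List.append_assoc, hu', ht', ← huw]; simp
              have := List.append_cancel_left hcan
              rw [← this]; simp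
            · by_cases hu0 : u = []
              · exfalso
                subst hu0
                have htpre : tr.toList <+: c :: t := ⟨w, by simpa using huw⟩
                have hq0pre : q0.1 <+: c :: t :=
                  (htrshape ▸ List.prefix_append q0.1 (p0.1.drop 1)).trans htpre
                have hq0q : q0 = q := by
                  by_cases hl : q0.1.length ≤ q.1.length
                  · exact pv_keys_prefree q0 hq0mem q hqmem
                      (List.prefix_of_prefix_length_le hq0pre ⟨t', ht'⟩ hl)
                  · exact (pv_keys_prefree q hqmem q0 hq0mem
                      (List.prefix_of_prefix_length_le ⟨t', ht'⟩ hq0pre (by omega))).symm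
                subst hq0q
                have hp0t : p0.1.drop 1 <+: t' := by
                  have h1 : q0.1 ++ p0.1.drop 1 <+: q0.1 ++ t' := by
                    rw [ht', ← htrshape]; exact htpre
                  exact (List.prefix_append_right_inj q0.1).mp h1
                have hbool : (p0.1.drop 1).isPrefixOf t' = true :=
                  List.isPrefixOf_iff_prefix.mpr hp0t
                exact (List.find?_eq_none.mp hedge1 p0 hp0mem)
                  (by simp only [hhead0, hbool, Bool.and_self])
              · exfalso
                have hul : 1 ≤ u.length := List.length_pos_iff.mpr hu0
                have hvsuf : q.1.drop u.length <:+ q.1 := List.drop_suffix _ _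
                have hvne : q.1.drop u.length ≠ [] := by
                  intro h
                  have := congrArg List.length h
                  simp at this; omega
                have hvq : q.1.drop u.length ≠ q.1 := by
                  intro h
                  have := congrArg List.length h
                  simp at this; omega
                have hdecomp : tr.toList ++ w = q.1.drop u.length ++ t' := by
                  have h1 := congrArg (List.drop u.length) huw
                  rw [List.append_assoc, List.drop_left] at h1
                  rw [h1, ← ht', List.drop_append_of_le_length (by omega)]
                have hvpre : q.1.drop u.length <+: tr.toList := by
                  apply List.prefix_of_prefix_length_le ⟨t', hdecomp.symm⟩
                    (List.prefix_append tr.toList w)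
                  have h14 := pv_keys_short q hqmem
                  have h15 := pv_trig_long tr htr
                  rw [List.length_drop]
                  omega
                exact pv_trig_in_key q hqmem _ ((List.mem_tails _ _).mpr hvsuf)
                  hvne hvq tr htr hvpre
          intro heq
          exact ih t' (by omega) ⟨tr, htr, hsub⟩ (List.append_cancel_left heq)
        | some p1 =>
          dsimp only
          have hp1mem : p1 ∈ pvPairs := List.mem_of_find?_eq_some hedge1
          have hpred := List.find?_some hedge1
          simp only [Bool.and_eq_true] at hpred
          have hp1head : (q.2.getLast? == p1.1.head?) = true := hpred.1
          have hp1tail : (p1.1.drop 1).isPrefixOf t' = true := hpred.2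
          rw [if_pos hp1mem]
          obtain ⟨chq, hchq⟩ := Option.ne_none_iff_exists'.mp
            (show q.2.getLast? ≠ none by rw [Ne, List.getLast?_eq_none_iff]; exact hqv)
          have hheadp1 : p1.1.head? = some chq := by
            have := (beq_iff_eq).mp hp1head
            rw [hchq] at this; exact this.symm
          have hqsplit : q.2 = q.2.dropLast ++ [chq] := by
            have h3 := List.dropLast_append_getLast (l := q.2) hqv
            have h4 : q.2.getLast hqv = chq := by
              have h5 := List.getLast?_eq_some_getLast (l := q.2) hqv
              rw [h5] at hchq; simpa using hchq
            rw [h4] at h3; exact h3.symm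
          conv_rhs => rw [hqsplit]
          by_cases happ : p1 = ("approximately".toList, "about".toList)
          · subst happ
            have hchq' : chq = 'a' := by
              have : some 'a' = some chq := hheadp1
              simpa using this.symm
            subst hchq'
            have hedge2 : pvEdge ("about".toList : List Char)
                (List.drop (("approximately".toList : List Char).length - 1) t') = none := by
              rw [pvEdge, List.find?_eq_none]
              intro k hk hkp
              simp only [Bool.and_eq_true] at hkp
              have h0 := pv_about_noedge k hk
              rw [h0] at hkp
              exact Bool.false_ne_true hkp.1
            rw [hedge2]
            dsimp only
            obtain ⟨t2, ht2⟩ := List.isPrefixOf_iff_prefix.mp hp1tail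
            have ht2' : t' = 'p' :: 'p' :: ("roximately".toList ++ t2) := by
              rw [← ht2]; rfl
            have hscan : pvScan t'.length t' = 'p' :: pvScan (('p' :: ("roximately".toList ++ t2)).length) ('p' :: ("roximately".toList ++ t2)) := by
              conv_lhs => rw [ht2']
              rw [show ('p' :: 'p' :: ("roximately".toList ++ t2)).length
                  = ('p' :: ("roximately".toList ++ t2)).length + 1 from rfl]
              simp only [pvScan, hfindpp]
            rw [hscan]
            simp only [List.append_assoc, List.singleton_append]
            exact pv_neq_second (by decide)
          · have hne : (p1.2.head? == p1.1.head?) = false :=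
              pv_headne q hqmem p1 hp1mem hp1head happ
            have hvne2 : 2 ≤ p1.2.length := pv_vals_len2 p1 hp1mem
            obtain ⟨v1, vrest, hv1⟩ := List.exists_cons_of_ne_nil (pv_vals_ne_nil p1 hp1mem)
            have hv1chq : v1 ≠ chq := by
              intro h
              rw [hv1, hheadp1] at hne
              simp [h] at hne
            simp only [List.append_assoc, List.singleton_append]
            cases hedge2 : pvEdge p1.2 (List.drop (p1.1.length - 1) t') with
            | none =>
              dsimp only
              exact pv_neq_head (x := p1.2 ++ _) (by rw [hv1]; rfl) rfl hv1chq
            | some p2 =>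
              dsimp only
              rw [if_pos (List.mem_of_find?_eq_some hedge2)]
              obtain ⟨v2, vrest2, hv2⟩ := List.exists_cons_of_ne_nil
                (show vrest ≠ [] by
                  intro h
                  rw [hv1, h] at hvne2
                  simp at hvne2)
              have hdl : p1.2.dropLast = v1 :: (v2 :: vrest2).dropLast := by
                rw [hv1, hv2]; rfl
              exact pv_neq_head (x := p1.2.dropLast ++ _) (by rw [hdl]; rfl) rfl hv1chq

lemma pv_fold_toList : ∀ (ps : List (String × String)) (T : String),
    (ps.foldl (fun t p => PySem.Str.replace t p.1 p.2) T).toList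
      = ps.foldl (fun l p => PySem.Chars.replace l p.1.toList p.2.toList) T.toList := by
  intro ps
  induction ps with
  | nil => intro T; rfl
  | cons p ps ih =>
    intro T
    rw [List.foldl_cons, List.foldl_cons, ih]
    simp only [PySem.Str.replace, String.toList_ofList]

-- ===== VERDICT (by name: the statement is the Claim_ definition above) =====
theorem adapt_language_py_spec : Claim_unchanged_adapt_language_py := by
  intro text age_group _ hnD
  by_cases hage : age_group = "3-5"
  · subst hage
    have hnt : ∀ tr ∈ pvTriggers, ¬ tr.toList <:+: text.toList := by
      intro tr htr hinf
      have hin : PySem.Str.isIn tr text = true := (PySem.Str.isIn_iff_infix tr text).mpr hinf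
      simp only [pvTriggers, List.mem_cons, List.not_mem_nil, or_false] at htr
      apply hnD
      refine ⟨rfl, ?_⟩
      rcases htr with rfl | rfl | rfl | rfl | rfl | rfl | rfl
      · exact Or.inl hin
      · exact Or.inr (Or.inl hin)
      · exact Or.inr (Or.inr (Or.inl hin))
      · exact Or.inr (Or.inr (Or.inr (Or.inl hin)))
      · exact Or.inr (Or.inr (Or.inr (Or.inr (Or.inl hin))))
      · exact Or.inr (Or.inr (Or.inr (Or.inr (Or.inr (Or.inl hin)))))
      · exact Or.inr (Or.inr (Or.inr (Or.inr (Or.inr (Or.inr hin)))))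
    show adapt_language_py text "3-5" = adapt_language_py_alt text "3-5"
    apply String.toList_inj.mp
    have hA : adapt_language_py text "3-5"
        = ([("fundamental", "basic"), ("systematically", "step by step"),
            ("perspective", "way of looking at it"), ("component", "part"), ("concept", "idea"),
            ("principle", "rule"), ("calculate", "figure out"), ("efficient", "fast"),
            ("approximately", "about")] : List (String × String)).foldl
            (fun t p => PySem.Str.replace t p.1 p.2) text := rfl
    have hB : adapt_language_py_alt text "3-5"
        = String.ofList (pvScan text.toList.length text.toList) := rfl
    rw [hA, hB, String.toList_ofList, pv_fold_toList]
    exact (pv_chainG text.toList).trans (pv_offTrig text.toList.length text.toList le_rfl hnt)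
  · show adapt_language_py text age_group = adapt_language_py_alt text age_group
    unfold adapt_language_py adapt_language_py_alt
    rw [if_neg (by simpa using hage), if_neg (by simpa using hage)]

theorem adapt_language_py_changed : Claim_changed_adapt_language_py := by
  unfold Claim_changed_adapt_language_py; decide

theorem adapt_language_py_tight : Claim_exact_adapt_language_py := by
  intro text age_group _ hD heq
  obtain ⟨hage, hany⟩ := hD
  subst hage
  have htr : ∃ tr ∈ pvTriggers, tr.toList <:+: text.toList := by
    rcases hany with h | h | h | h | h | h | h
    · exact ⟨_, by simp [pvTriggers], (PySem.Str.isIn_iff_infix _ text).mp h⟩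
    · exact ⟨_, by simp [pvTriggers], (PySem.Str.isIn_iff_infix _ text).mp h⟩
    · exact ⟨_, by simp [pvTriggers], (PySem.Str.isIn_iff_infix _ text).mp h⟩
    · exact ⟨_, by simp [pvTriggers], (PySem.Str.isIn_iff_infix _ text).mp h⟩
    · exact ⟨_, by simp [pvTriggers], (PySem.Str.isIn_iff_infix _ text).mp h⟩
    · exact ⟨_, by simp [pvTriggers], (PySem.Str.isIn_iff_infix _ text).mp h⟩
    · exact ⟨_, by simp [pvTriggers], (PySem.Str.isIn_iff_infix _ text).mp h⟩
  apply pv_onTrig text.toList.length text.toList le_rfl htr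
  have hA : adapt_language_py text "3-5"
      = ([("fundamental", "basic"), ("systematically", "step by step"),
          ("perspective", "way of looking at it"), ("component", "part"), ("concept", "idea"),
          ("principle", "rule"), ("calculate", "figure out"), ("efficient", "fast"),
          ("approximately", "about")] : List (String × String)).foldl
          (fun t p => PySem.Str.replace t p.1 p.2) text := rfl
  have hB : adapt_language_py_alt text "3-5"
      = String.ofList (pvScan text.toList.length text.toList) := rfl
  have := congrArg String.toList heq
  rw [hA, hB, String.toList_ofList, pv_fold_toList] at this
  calc pvG pvPairs text.toList.length text.toList
      = _ := (pv_chainG text.toList).symm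
    _ = pvScan text.toList.length text.toList := this
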